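-- pv_equiv track=rewrite | github.com/tomheon/diffscuss | find-local-source.py | _closest_line_num
-- ===== SOURCE A (Python) =====
-- def _closest_line_num(fil, orig_line_num, orig_line):
--     """
--     Find the line in @fil that best matches the @orig_line found at
--     @orig_line_num.
--
--     This is currently done by:
--
--     - finding all the lines in @fil that, when stripped, match the
--       @orig_line exactly
--
--     - return the number the matching line with the smallest absolutely
--       distance from @orig_line_num
--
--     - if no matching lines are found, returning @orig_line_num
--
--     This works decently for a broad number of cases, but could also be
--     improved for cases in which the @orig_line has subsequently been
--     modified.
--     """
--     # skip the first char, which is either +, -, or ' ', since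
--     # orig_line is a diff line
--     orig_line = orig_line[1:].strip()
--     matching_line_nums = []
--
--     for ind, line in enumerate(fil):
--         line = line.strip()
--         if orig_line == line:
--             matching_line_nums.append(ind + 1)
--
--     if not matching_line_nums:
--         return orig_line_num
--
--     matching_line_nums = [(abs(line_num - orig_line_num), line_num)
--                           for line_num
--                           in matching_line_nums]
--     matching_line_nums.sort()
--
--     return matching_line_nums[0][1]
-- ===== SOURCE B (Python) =====
-- def _closest_line_num(fil, orig_line_num, orig_line):
--     # One pass keeping the best (distance, line_num) so far; no list, no sort.
--     target = orig_line[1:].strip()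
--     best = None  # (distance, line_num) of the best match seen so far
--     for ind, line in enumerate(fil):
--         if line.strip() == target:
--             d = abs(ind + 1 - orig_line_num)
--             if best is None or d < best[0]:
--                 best = (d, ind + 1)
--     return orig_line_num if best is None else best[1]
-- ===== Notes on version B (the rewrite author's own statement) =====
-- stated objective: simpler
-- what changed: Replaces collecting all matching line numbers, building (distance, line_num) pairs and sorting them with a single pass that keeps the best (distance, line_num) seen so far, using strict improvement to reproduce the smallest-line-number tie-break.
import Mathlib
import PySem

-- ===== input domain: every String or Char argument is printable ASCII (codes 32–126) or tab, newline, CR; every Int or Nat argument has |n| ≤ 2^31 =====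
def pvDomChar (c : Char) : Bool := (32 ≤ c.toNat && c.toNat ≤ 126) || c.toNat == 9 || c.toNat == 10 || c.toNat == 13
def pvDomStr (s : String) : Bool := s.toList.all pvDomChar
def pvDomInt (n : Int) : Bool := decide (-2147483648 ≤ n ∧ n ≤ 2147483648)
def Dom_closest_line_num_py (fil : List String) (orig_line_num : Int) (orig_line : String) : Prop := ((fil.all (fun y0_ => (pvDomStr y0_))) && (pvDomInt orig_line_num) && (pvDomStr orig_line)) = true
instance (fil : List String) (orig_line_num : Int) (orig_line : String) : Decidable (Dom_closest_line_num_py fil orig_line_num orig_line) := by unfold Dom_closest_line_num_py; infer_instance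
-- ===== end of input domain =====

-- B replaces A's collect-all-matches + sort-of-(distance,line_num)-pairs with a single
-- pass that keeps the best (distance, line_num) seen so far (strict improvement only,
-- which reproduces the smallest-line-number tie-break).

-- ===== PORT A =====
def closest_line_num_py (fil : List String) (orig_line_num : Int) (orig_line : String) : Int :=
  -- orig_line = orig_line[1:].strip()
  let orig_line' := PySem.Str.strip (PySem.Str.slice orig_line (some 1) none)
  -- for ind, line in enumerate(fil): line = line.strip(); if orig_line == line: append(ind+1)
  let matching_line_nums : List Int :=
    (PySem.List.enumerate fil 0).foldl
      (fun acc p => if orig_line' == PySem.Str.strip p.2 then acc ++ [p.1 + 1] else acc) []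
  if matching_line_nums = [] then orig_line_num
  else
    let pairs := matching_line_nums.map (fun line_num => (|line_num - orig_line_num|, line_num))
    match PySem.List.sorted2 pairs Prod.fst Prod.snd with
    | [] => orig_line_num   -- unreachable: pairs is nonempty
    | p :: _ => p.2

-- ===== PORT B =====
def closest_line_num_py_alt (fil : List String) (orig_line_num : Int) (orig_line : String) : Int :=
  let target := PySem.Str.strip (PySem.Str.slice orig_line (some 1) none)
  let best : Option (Int × Int) :=
    (PySem.List.enumerate fil 0).foldl
      (fun best p =>
        if PySem.Str.strip p.2 == target then
          let d := |p.1 + 1 - orig_line_num|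
          match best with
          | none => some (d, p.1 + 1)
          | some b => if d < b.1 then some (d, p.1 + 1) else some b
        else best) none
  match best with
  | none => orig_line_num
  | some b => b.2

-- ===== PRECONDITION & SPEC =====
def Spec_closest_line_num_py (fil : List String) (orig_line_num : Int) (orig_line : String) (out : Int) : Prop := out = closest_line_num_py_alt fil orig_line_num orig_line
instance (fil : List String) (orig_line_num : Int) (orig_line : String) (out : Int) : Decidable (Spec_closest_line_num_py fil orig_line_num orig_line out) := by unfold Spec_closest_line_num_py; infer_instance

-- ===== CLAIM (what is proved, stated in full; the proofs are below) =====
def Claim_equal_closest_line_num_py : Prop := ∀ (fil : List String) (orig_line_num : Int) (orig_line : String), Dom_closest_line_num_py fil orig_line_num orig_line → Spec_closest_line_num_py fil orig_line_num orig_line (closest_line_num_py fil orig_line_num orig_line)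

-- ===== LEMMAS AND PROOFS =====

-- The list of matching line numbers, as a structural recursion over fil with start index s.
def pvMs (tgt : String) : List String → Int → List Int
  | [], _ => []
  | l :: ls, s => if tgt == PySem.Str.strip l then (s + 1) :: pvMs tgt ls (s + 1) else pvMs tgt ls (s + 1)

-- A's collecting loop computes acc ++ pvMs.
theorem pvMsA (tgt : String) : ∀ (fil : List String) (s : Int) (acc : List Int),
    (PySem.List.enumerate fil s).foldl
      (fun acc p => if tgt == PySem.Str.strip p.2 then acc ++ [p.1 + 1] else acc) acc
    = acc ++ pvMs tgt fil s := by
  intro fil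
  induction fil with
  | nil => intro s acc; simp [pvMs, PySem.List.enumerate_nil]
  | cons l ls ih =>
    intro s acc
    rw [PySem.List.enumerate_cons, List.foldl_cons]
    by_cases h : (tgt == PySem.Str.strip l) = true
    · simp only [h, if_pos, pvMs, ih]
      simp
    · simp only [pvMs]
      rw [if_neg h, if_neg h, ih]

def pvStepB (o : Int) (b : Option (Int × Int)) (n : Int) : Option (Int × Int) :=
  match b with
  | none => some (|n - o|, n)
  | some h => if |n - o| < h.1 then some (|n - o|, n) else some h

-- B's loop over enumerate equals the same fold over pvMs.
theorem pvMsB (tgt : String) (o : Int) : ∀ (fil : List String) (s : Int) (b : Option (Int × Int)),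
    (PySem.List.enumerate fil s).foldl
      (fun best p =>
        if PySem.Str.strip p.2 == tgt then
          let d := |p.1 + 1 - o|
          match best with
          | none => some (d, p.1 + 1)
          | some b => if d < b.1 then some (d, p.1 + 1) else some b
        else best) b
    = (pvMs tgt fil s).foldl (pvStepB o) b := by
  intro fil
  induction fil with
  | nil => intro s b; simp [pvMs, PySem.List.enumerate_nil]
  | cons l ls ih =>
    intro s b
    rw [PySem.List.enumerate_cons, List.foldl_cons]
    have hc : (PySem.Str.strip l == tgt) = (tgt == PySem.Str.strip l) := by
      simp [BEq.comm]
    by_cases h : (tgt == PySem.Str.strip l) = true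
    · simp only [pvMs, h, if_pos, List.foldl_cons]
      rw [hc, if_pos h, ih]
      rfl
    · simp only [pvMs]
      rw [if_neg h, hc, if_neg h, ih]

-- Every matching line number exceeds the start index.
theorem pvMs_gt (tgt : String) : ∀ (fil : List String) (s : Int), ∀ n ∈ pvMs tgt fil s, s < n := by
  intro fil
  induction fil with
  | nil => intro s n hn; simp [pvMs] at hn
  | cons l ls ih =>
    intro s n hn
    simp only [pvMs] at hn
    split at hn
    · rcases List.mem_cons.mp hn with h | h
      · omega
      · have := ih (s + 1) n h; omega
    · have := ih (s + 1) n hn; omega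

theorem pvMs_pairwise (tgt : String) : ∀ (fil : List String) (s : Int),
    (pvMs tgt fil s).Pairwise (· < ·) := by
  intro fil
  induction fil with
  | nil => intro s; simp [pvMs]
  | cons l ls ih =>
    intro s
    simp only [pvMs]
    split
    · exact List.Pairwise.cons (fun n hn => by have := pvMs_gt tgt ls (s + 1) n hn; omega) (ih (s + 1))
    · exact ih (s + 1)

-- Head of insertBy: the new head is x iff x goes before the old head.
theorem pvHead_insertBy {α : Type} (before : α → α → Bool) (x : α) (acc : List α) :
    (PySem.List.insertBy before x acc).head? =
      some (match acc.head? with | none => x | some h => if before x h then x else h) := by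
  cases acc with
  | nil => rfl
  | cons y ys =>
    simp only [PySem.List.insertBy, List.head?_cons]
    split <;> simp_all

theorem pvHead_foldl_insertBy {α : Type} (before : α → α → Bool) :
    ∀ (ms : List α) (acc : List α),
    (ms.foldl (fun a x => PySem.List.insertBy before x a) acc).head? =
      ms.foldl (fun (b : Option α) x =>
        some (match b with | none => x | some h => if before x h then x else h)) acc.head? := by
  intro ms
  induction ms with
  | nil => intro acc; rfl
  | cons x xs ih =>
    intro acc
    rw [List.foldl_cons, List.foldl_cons, ih, pvHead_insertBy]

def pvBefore : Int × Int → Int × Int → Bool :=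
  fun a b => decide (a.1 < b.1) || (!decide (b.1 < a.1) && decide (a.2 < b.2))

def pvStepA (o : Int) (b : Option (Int × Int)) (n : Int) : Option (Int × Int) :=
  some (match b with
        | none => (|n - o|, n)
        | some h => if pvBefore (|n - o|, n) h then (|n - o|, n) else h)

-- On a strictly increasing list, the lexicographic-min fold equals B's strict-improvement fold.
theorem pvFoldAB (o : Int) : ∀ (ms : List Int), ms.Pairwise (· < ·) →
    ∀ (b : Option (Int × Int)), (∀ n ∈ ms, ∀ p, b = some p → p.2 < n) →
    ms.foldl (pvStepA o) b = ms.foldl (pvStepB o) b := by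
  intro ms
  induction ms with
  | nil => intro _ b _; rfl
  | cons n ns ih =>
    intro hpw b hb
    rw [List.foldl_cons, List.foldl_cons]
    have hpw' := (List.pairwise_cons.mp hpw).2
    have hlt := (List.pairwise_cons.mp hpw).1
    have hstep : pvStepA o b n = pvStepB o b n := by
      cases b with
      | none => rfl
      | some h =>
        have hh : h.2 < n := hb n (List.mem_cons_self) h rfl
        simp only [pvStepA, pvStepB, pvBefore]
        have hcond : (decide (|n - o| < h.1) || (!decide (h.1 < |n - o|) && decide (n < h.2)))
            = decide (|n - o| < h.1) := by
          by_cases hd : |n - o| < h.1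
          · simp [hd]
          · simp [hd]; omega
        simp only [hcond]
        by_cases hd : |n - o| < h.1 <;> simp [hd]
    rw [hstep]
    apply ih hpw'
    intro m hm p hp
    cases b with
    | none =>
      simp only [pvStepB] at hp
      cases hp
      exact hlt m hm
    | some h =>
      have hh : h.2 < n := hb n (List.mem_cons_self) h rfl
      have hm' : n < m := hlt m hm
      simp only [pvStepB] at hp
      split at hp <;> (cases hp; omega)

-- B's fold never returns none on a nonempty list / some accumulator.
theorem pvStepB_isSome (o : Int) : ∀ (ms : List Int) (b : Option (Int × Int)),
    (b.isSome ∨ ms ≠ []) → (ms.foldl (pvStepB o) b).isSome := by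
  intro ms
  induction ms with
  | nil =>
    intro b h
    cases h with
    | inl h => simpa using h
    | inr h => exact absurd rfl h
  | cons n ns ih =>
    intro b _
    rw [List.foldl_cons]
    apply ih
    left
    cases b with
    | none => rfl
    | some h => simp only [pvStepB]; split <;> rfl

-- ===== VERDICT (by name: the statement is the Claim_ definition above) =====
theorem closest_line_num_py_spec : Claim_equal_closest_line_num_py := by
  intro fil o orig_line _
  unfold Spec_closest_line_num_py closest_line_num_py closest_line_num_py_alt
  set tgt := PySem.Str.strip (PySem.Str.slice orig_line (some 1) none) with htgt
  simp only []
  rw [pvMsA tgt fil 0 [], pvMsB tgt o fil 0 none]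
  simp only [List.nil_append]
  set ms := pvMs tgt fil 0 with hms
  by_cases hnil : ms = []
  · simp [hnil]
  · rw [if_neg hnil]
    -- A's sorted head
    have hA : (PySem.List.sorted2 (ms.map (fun n => (|n - o|, n))) Prod.fst Prod.snd).head?
        = ms.foldl (pvStepA o) none := by
      show (List.foldl (fun acc x => PySem.List.insertBy _ x acc) []
              (ms.map (fun n => (|n - o|, n)))).head? = _
      rw [pvHead_foldl_insertBy, List.foldl_map]
      simp only [List.head?_nil]
      apply PySem.List.foldl_congr_mem
      intro b n _
      cases b <;> rfl
    have hAB : ms.foldl (pvStepA o) none = ms.foldl (pvStepB o) none := by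
      apply pvFoldAB o ms (pvMs_pairwise tgt fil 0) none
      intro n _ p hp; cases hp
    have hsome := pvStepB_isSome o ms none (Or.inr hnil)
    rcases hres : ms.foldl (pvStepB o) none with _ | p
    · rw [hres] at hsome; simp at hsome
    · have : (PySem.List.sorted2 (ms.map (fun n => (|n - o|, n))) Prod.fst Prod.snd).head? = some p := by
        rw [hA, hAB, hres]
      rcases hsl : PySem.List.sorted2 (ms.map (fun n => (|n - o|, n))) Prod.fst Prod.snd with _ | ⟨q, rest⟩
      · rw [hsl] at this; simp at this
      · rw [hsl] at this
        simp only [List.head?_cons, Option.some.injEq] at this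
        simp [this]
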